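-- pv_equiv track=rewrite | github.com/jvalansi/word2code | word2code/sentence_parser.py | get_parentheses
-- ===== SOURCE A (Python) =====
-- def get_parentheses(parse):
--     depth = 0
--     for i in range(len(parse)):
--         if parse[i] == '(':
--             depth += 1
--         if parse[i] == ')':
--             depth -= 1
--         if depth == 0:
--             return parse[:i+1]
--     return None
-- ===== SOURCE B (Python) =====
-- def get_parentheses(parse):
--     # Build the full running-depth table in one pass, then find the first
--     # index where the depth is 0 and slice there; None if no such index.
--     depths = []
--     d = 0
--     for c in parse:
--         d += (c == '(') - (c == ')')
--         depths.append(d)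
--     if 0 in depths:
--         return parse[:depths.index(0) + 1]
--     return None
-- ===== Notes on version B (the rewrite author's own statement) =====
-- stated objective: alternative
-- what changed: B builds the whole prefix-depth table in one pass and then, in a separate pass, locates the first zero depth and slices there, instead of A's interleaved index loop with early return.
import Mathlib
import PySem

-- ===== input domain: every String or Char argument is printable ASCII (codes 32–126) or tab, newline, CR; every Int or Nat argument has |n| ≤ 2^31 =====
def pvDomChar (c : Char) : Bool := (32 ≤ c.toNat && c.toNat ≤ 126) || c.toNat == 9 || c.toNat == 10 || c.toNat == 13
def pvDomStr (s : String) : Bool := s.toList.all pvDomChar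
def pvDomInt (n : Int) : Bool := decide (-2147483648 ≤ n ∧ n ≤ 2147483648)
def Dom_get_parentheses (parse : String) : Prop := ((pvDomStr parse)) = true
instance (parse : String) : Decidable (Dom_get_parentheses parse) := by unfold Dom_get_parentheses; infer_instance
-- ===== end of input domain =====

-- B builds the full running-depth table first, then finds the first zero in a separate pass; alternative decomposition, same cost.


-- ===== PORT A =====
-- the for-i loop with early return; parse[:i+1] with i+1 ≥ 1 is exactly take (i+1)
def getParenLoopA (rest : List Char) (depth : Int) (i : Nat) (full : List Char) : Option String :=
  match rest with
  | [] => none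
  | c :: rs =>
    let d1 := if c == '(' then depth + 1 else depth
    let d2 := if c == ')' then d1 - 1 else d1
    if d2 = 0 then some (String.ofList (full.take (i + 1)))
    else getParenLoopA rs d2 (i + 1) full

def get_parentheses (parse : String) : Option String :=
  getParenLoopA parse.toList 0 0 parse.toList

-- ===== PORT B =====
-- one pass building the depth table, then '0 in depths' / 'depths.index(0)' as index?
def get_parentheses_alt (parse : String) : Option String :=
  let depths := (parse.toList.foldl
      (fun (acc : List Int × Int) c =>
        let d := acc.2 + (if c == '(' then 1 else 0) - (if c == ')' then 1 else 0)
        (acc.1 ++ [d], d)) ([], 0)).1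
  match PySem.List.index? depths 0 with
  | some j => some (String.ofList (parse.toList.take (j + 1)))
  | none => none

-- ===== PRECONDITION & SPEC =====
def Spec_get_parentheses (parse : String) (out : Option String) : Prop := out = get_parentheses_alt parse
instance (parse : String) (out : Option String) : Decidable (Spec_get_parentheses parse out) := by unfold Spec_get_parentheses; infer_instance

-- ===== CLAIM (what is proved, stated in full; the proofs are below) =====
def Claim_equal_get_parentheses : Prop := ∀ (parse : String), Dom_get_parentheses parse → Spec_get_parentheses parse (get_parentheses parse)

-- ===== LEMMAS AND PROOFS =====
-- recursive characterisation of the prefix-depth table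
def pdepths (rest : List Char) (d : Int) : List Int :=
  match rest with
  | [] => []
  | c :: rs =>
    let d' := d + (if c == '(' then 1 else 0) - (if c == ')' then 1 else 0)
    d' :: pdepths rs d'

theorem foldl_eq_pdepths (rest : List Char) (acc : List Int) (d : Int) :
    (rest.foldl
      (fun (acc : List Int × Int) c =>
        let d := acc.2 + (if c == '(' then 1 else 0) - (if c == ')' then 1 else 0)
        (acc.1 ++ [d], d)) (acc, d)).1 = acc ++ pdepths rest d := by
  induction rest generalizing acc d with
  | nil => simp [pdepths]
  | cons c rs ih =>
    rw [List.foldl_cons]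
    exact (ih (acc ++ [d + (if c == '(' then 1 else 0) - (if c == ')' then 1 else 0)])
      (d + (if c == '(' then 1 else 0) - (if c == ')' then 1 else 0))).trans
      (by simp [pdepths])

theorem loopA_eq_index (rest : List Char) (d : Int) (i : Nat) (full : List Char) :
    getParenLoopA rest d i full =
      match PySem.List.index? (pdepths rest d) 0 with
      | some j => some (String.ofList (full.take (i + j + 1)))
      | none => none := by
  induction rest generalizing d i with
  | nil => simp [getParenLoopA, pdepths, PySem.List.index?]
  | cons c rs ih =>
    have hd2 : (if c == ')' then (if c == '(' then d + 1 else d) - 1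
                else (if c == '(' then d + 1 else d))
        = d + (if c == '(' then 1 else 0) - (if c == ')' then 1 else 0) := by
      split_ifs <;> ring
    show (if (if c == ')' then (if c == '(' then d + 1 else d) - 1
             else (if c == '(' then d + 1 else d)) = 0
          then some (String.ofList (full.take (i + 1)))
          else getParenLoopA rs _ (i + 1) full) = _
    rw [hd2]
    have hc : pdepths (c :: rs) d
        = (d + (if c == '(' then 1 else 0) - (if c == ')' then 1 else 0))
          :: pdepths rs (d + (if c == '(' then 1 else 0) - (if c == ')' then 1 else 0)) := rfl
    by_cases h0 : d + (if c == '(' then 1 else 0) - (if c == ')' then 1 else 0) = 0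
    · rw [if_pos h0, hc, h0, PySem.List.index?_cons_self]
    · rw [if_neg h0, hc, PySem.List.index?_cons_of_ne _ h0, ih _ (i + 1)]
      cases PySem.List.index? (pdepths rs (d + (if c == '(' then 1 else 0) - (if c == ')' then 1 else 0))) 0 with
      | none => rfl
      | some j =>
        simp only [Option.map_some]
        have he : i + 1 + j + 1 = i + (j + 1) + 1 := by omega
        rw [he]

-- ===== VERDICT (by name: the statement is the Claim_ definition above) =====
theorem get_parentheses_spec : Claim_equal_get_parentheses := by
  intro parse _
  unfold Spec_get_parentheses get_parentheses get_parentheses_alt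
  rw [loopA_eq_index, foldl_eq_pdepths]
  simp
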